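-- pv_equiv track=rewrite | github.com/benreynwar/slvcodec | slvcodec/conversions.py | uint_to_list_of_uints
-- ===== SOURCE A (Python) =====
-- def uint_to_list_of_uints(uint, size, width):
--     '''
--     Convert an unsigned integer into a list of unsigned integers.
--
--     Args:
--         `uint`: the input unsigned integer
--         `width`: The width of each individual unsigned integer.
--         `size`: The number of items in the produced list.
--
--     >>> uint_to_list_of_uints(5, size=4, width=1)
--     [1, 0, 1, 0]
--     >>> uint_to_list_of_uints(27, size=3, width=2)
--     [3, 2, 1]
--     '''
--     if uint is None:
--         output = [None] * size
--     else:
--         assert uint >= 0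
--         residual = uint
--         f = pow(2, width)
--         output = []
--         for i in range(size):
--             output.append(residual % f)
--             residual = residual >> width
--         assert residual == 0
--     return output
-- ===== SOURCE B (Python) =====
-- def uint_to_list_of_uints(uint, size, width):
--     if uint is None:
--         return [None] * size
--     assert uint >= 0
--     if size <= 0:
--         assert uint == 0
--         return []
--     mask = (1 << width) - 1
--     out = [(uint >> (i * width)) & mask for i in range(size)]
--     assert uint >> (size * width) == 0
--     return out
-- ===== Notes on version B (the rewrite author's own statement) =====
-- stated objective: simpler
-- what changed: Replaces the sequential residual accumulator loop (repeated mod and shift of a mutating residual) by a stateless comprehension extracting chunk i directly as (uint >> (i*width)) & mask, with the fit check done once as a single shift instead of being accumulated through the loop.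
import Mathlib
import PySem

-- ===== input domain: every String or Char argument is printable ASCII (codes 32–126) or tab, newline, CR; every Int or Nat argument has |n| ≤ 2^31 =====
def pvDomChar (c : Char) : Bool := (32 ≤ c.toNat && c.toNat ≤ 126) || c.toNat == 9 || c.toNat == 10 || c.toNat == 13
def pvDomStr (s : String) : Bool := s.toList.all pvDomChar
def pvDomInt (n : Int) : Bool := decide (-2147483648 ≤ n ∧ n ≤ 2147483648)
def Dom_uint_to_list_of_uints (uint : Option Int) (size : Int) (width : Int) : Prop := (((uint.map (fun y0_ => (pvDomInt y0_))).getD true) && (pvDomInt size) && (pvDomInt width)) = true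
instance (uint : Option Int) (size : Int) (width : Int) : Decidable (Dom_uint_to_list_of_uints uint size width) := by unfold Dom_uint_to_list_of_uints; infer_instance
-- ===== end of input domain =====

-- B replaces A's sequential residual accumulator loop by a stateless per-index
-- extraction (uint >> (i*width)) & mask with a single final fit-check shift.

-- ===== PORT A =====
-- literal port of A; the asserts (uint >= 0, residual == 0) and the negative-width
-- shift / float pow, where Python raises or leaves Int, are excluded by Pre_ below.
def uint_to_list_of_uints (uint : Option Int) (size : Int) (width : Int) : List (Option Int) :=
  match uint with
  | none => List.replicate size.toNat none
  | some v =>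
    -- f = pow(2, width), inlined; Pre_ gives 0 ≤ width whenever the loop runs
    ((PySem.List.pyRange 0 size 1).foldl
      (fun (st : List (Option Int) × Int) (_ : Int) =>
        (st.1 ++ [some (PySem.Int.mod st.2 (2 ^ width.toNat))], st.2 >>> width.toNat)) ([], v)).1

-- ===== PORT B =====
def uint_to_list_of_uints_alt (uint : Option Int) (size : Int) (width : Int) : List (Option Int) :=
  match uint with
  | none => List.replicate size.toNat none
  | some v =>
    -- asserts model Python raises, excluded by Pre_
    if size ≤ 0 then []
    else
      let mask : Int := ((1 : Int) <<< width.toNat) - 1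
      (PySem.List.pyRange 0 size 1).map
        (fun i => some (PySem.Int.band (v >>> (i * width).toNat) mask))

-- ===== PRECONDITION & SPEC =====
-- Pre_ excludes exactly the inputs on which the Python A raises: a non-None uint
-- that is negative (assert uint >= 0) or does not fit in size*width bits
-- (assert residual == 0, i.e. uint ≠ 0 when size ≤ 0, else uint ≥ 2^(size*width)),
-- and a negative width when size > 0 (the shift residual >> width raises ValueError).
-- The fit bound is phrased via Nat.log2 so it is exact and computable for any size*width.
def Pre_uint_to_list_of_uints (uint : Option Int) (size : Int) (width : Int) : Prop :=
  ((uint.map (fun v => decide (0 ≤ v ∧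
      (if size ≤ 0 then v = 0
       else 0 ≤ width ∧ (v = 0 ∨ v.toNat.log2 < size.toNat * width.toNat))))).getD true) = true
instance (uint : Option Int) (size : Int) (width : Int) : Decidable (Pre_uint_to_list_of_uints uint size width) := by unfold Pre_uint_to_list_of_uints; infer_instance
def pvWitness_uint_to_list_of_uints : Option Int × Int × Int := (some 27, 3, 2)

def Spec_uint_to_list_of_uints (uint : Option Int) (size : Int) (width : Int) (out : List (Option Int)) : Prop := out = uint_to_list_of_uints_alt uint size width
instance (uint : Option Int) (size : Int) (width : Int) (out : List (Option Int)) : Decidable (Spec_uint_to_list_of_uints uint size width out) := by unfold Spec_uint_to_list_of_uints; infer_instance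

-- ===== CLAIM (what is proved, stated in full; the proofs are below) =====
def Claim_equal_uint_to_list_of_uints : Prop := ∀ (uint : Option Int) (size : Int) (width : Int), Dom_uint_to_list_of_uints uint size width → Pre_uint_to_list_of_uints uint size width → Spec_uint_to_list_of_uints uint size width (uint_to_list_of_uints uint size width)

-- ===== LEMMAS AND PROOFS =====

-- A's loop after n iterations: the list of the n low chunks, residual v >>> (n*w').
theorem pv_loopA (w' : Nat) (v : Int) (n : Nat) :
    ((List.range n).map (Nat.cast : Nat → Int)).foldl
      (fun (st : List (Option Int) × Int) (_ : Int) =>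
        (st.1 ++ [some (PySem.Int.mod st.2 (2 ^ w'))], st.2 >>> w')) ([], v)
    = ((List.range n).map (fun k => some (PySem.Int.mod (v >>> (k * w')) (2 ^ w'))),
       v >>> (n * w')) := by
  induction n with
  | zero => simp
  | succ n ih =>
    rw [List.range_succ, List.map_append, List.foldl_append, ih, List.map_append]
    have hsh : v >>> (n * w') >>> w' = v >>> ((n + 1) * w') := by
      rw [Int.shiftRight_eq_div_pow, Int.shiftRight_eq_div_pow, Int.shiftRight_eq_div_pow,
        Int.ediv_ediv_of_nonneg (by positivity)]
      push_cast
      rw [← pow_add, show n * w' + w' = (n + 1) * w' by ring]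
    simp [hsh]

-- for 0 ≤ x: Python's x % 2^w equals x & (2^w - 1)
theorem pv_mod_eq_band (x : Int) (hx : 0 ≤ x) (w : Nat) :
    PySem.Int.mod x (2 ^ w) = PySem.Int.band x (((1 : Int) <<< w) - 1) := by
  have h1 : ((1 : Int) <<< w) - 1 = ((2 ^ w - 1 : Nat) : Int) := by
    rw [Int.shiftLeft_eq]
    push_cast [Nat.one_le_two_pow]
    ring
  rw [PySem.Int.mod_eq_emod_of_pos (by positivity : (0:Int) < 2 ^ w), h1,
    PySem.Int.band_of_nonneg hx (by positivity : (0:Int) ≤ ((2 ^ w - 1 : Nat) : Int))]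
  rw [Int.toNat_natCast, Nat.and_two_pow_sub_one_eq_mod]
  conv_lhs => rw [← Int.toNat_of_nonneg hx]
  push_cast
  rfl

-- ===== VERDICT (by name: the statement is the Claim_ definition above) =====
theorem uint_to_list_of_uints_spec : Claim_equal_uint_to_list_of_uints := by
  intro uint size width _ hpre
  unfold Spec_uint_to_list_of_uints
  cases uint with
  | none => rfl
  | some v =>
    simp only [Pre_uint_to_list_of_uints, Option.map_some, Option.getD_some,
      decide_eq_true_eq] at hpre
    obtain ⟨hv, hcond⟩ := hpre
    by_cases hsz : size ≤ 0
    · -- loop empty on both sides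
      have hr : PySem.List.pyRange 0 size 1 = [] := by
        rw [PySem.List.pyRange_one]
        simp
        omega
      simp [uint_to_list_of_uints, uint_to_list_of_uints_alt, hsz, hr]
    · rw [if_neg hsz] at hcond
      obtain ⟨hw, -⟩ := hcond
      obtain ⟨w', rfl⟩ : ∃ w' : ℕ, width = (w' : Int) := ⟨width.toNat, (Int.toNat_of_nonneg hw).symm⟩
      have hrange : PySem.List.pyRange 0 size 1 = (List.range size.toNat).map (Nat.cast : Nat → Int) := by
        rw [PySem.List.pyRange_one]
        simp only [Int.sub_zero]
        apply List.map_congr_left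
        intro k _
        simp
      simp only [uint_to_list_of_uints, uint_to_list_of_uints_alt, if_neg hsz]
      rw [hrange, pv_loopA (w' : Int).toNat v size.toNat]
      simp only [List.map_map]
      apply List.map_congr_left
      intro k _
      have hk : ((k : Int) * (w' : Int)).toNat = k * w' := by
        rw [← Nat.cast_mul, Int.toNat_natCast]
      have hsh : (0 : Int) ≤ v >>> (k * w') := by
        rw [Int.shiftRight_eq_div_pow]
        positivity
      simp only [Function.comp, Int.toNat_natCast, hk]
      rw [pv_mod_eq_band _ hsh]
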